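-- pv_equiv track=rewrite | github.com/jheled/Ya-Ge-zy | Generala.py | rollScores
-- ===== SOURCE A (Python) =====
-- def rollScores(roll, availableCombinations) :
--   r0,r1,r2,r3,r4 = roll
--   assert r0 <= r1 <= r2 <= r3 <= r4
--
--   for i,avail in enumerate(availableCombinations[:6]):
--     if avail:
--       d = i + 1
--       n = (r0 == d) + (r1 == d) + (r2 == d) + (r3 == d) + (r4 == d)
--       n *= d
--
--       yield i,n
--
--   for i,avail in enumerate(availableCombinations[6:]):
--     if avail:
--       i += 6
--       hasMatch = False
--       if i == 6:
--         if tuple(roll) == (1,2,3,4,5) or tuple(roll) == (2,3,4,5,6) :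
--           yield i, 20
--           hasMatch = True
--       elif i == 7:
--         if r0 == r1 and r3 == r4 and (r2 == r1 or r2 == r3) :
--           yield i, 30
--           hasMatch = True
--       elif i == 8:
--         if r1 == r2 == r3 and (r0 == r1 or r4 == r3) :
--           yield i, 40
--           hasMatch = True
--       elif i == 9:
--         if r0 == r4 :
--           yield i, 50
--           hasMatch = True
--
--       if not hasMatch:
--         yield i, 0
-- ===== SOURCE B (Python) =====
-- def rollScores(roll, availableCombinations):
--     r0, r1, r2, r3, r4 = roll
--     assert r0 <= r1 <= r2 <= r3 <= r4
--
--     counts = {}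
--     for d in roll:
--         counts[d] = counts.get(d, 0) + 1
--     mult = sorted(counts.values())
--
--     def score(i):
--         if i < 6:
--             return counts.get(i + 1, 0) * (i + 1)
--         if i == 6:
--             return 20 if mult == [1, 1, 1, 1, 1] and r4 - r0 == 4 and r0 in (1, 2) else 0
--         if i == 7:
--             return 30 if mult == [2, 3] or mult == [5] else 0
--         if i == 8:
--             return 40 if mult[-1] >= 4 else 0
--         if i == 9:
--             return 50 if mult[-1] == 5 else 0
--         return 0
--
--     return [(i, score(i)) for i, avail in enumerate(availableCombinations) if avail]
-- ===== Notes on version B (the rewrite author's own statement) =====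
-- stated objective: idiomatic
-- what changed: B builds a face-count table once and reads every combination (upper scores and all four lower-section predicates) off the sorted count multiset via a single score(i) lookup over one enumerate pass, instead of A's two sliced loops with hand-written pairwise dice comparisons.
import Mathlib
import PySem

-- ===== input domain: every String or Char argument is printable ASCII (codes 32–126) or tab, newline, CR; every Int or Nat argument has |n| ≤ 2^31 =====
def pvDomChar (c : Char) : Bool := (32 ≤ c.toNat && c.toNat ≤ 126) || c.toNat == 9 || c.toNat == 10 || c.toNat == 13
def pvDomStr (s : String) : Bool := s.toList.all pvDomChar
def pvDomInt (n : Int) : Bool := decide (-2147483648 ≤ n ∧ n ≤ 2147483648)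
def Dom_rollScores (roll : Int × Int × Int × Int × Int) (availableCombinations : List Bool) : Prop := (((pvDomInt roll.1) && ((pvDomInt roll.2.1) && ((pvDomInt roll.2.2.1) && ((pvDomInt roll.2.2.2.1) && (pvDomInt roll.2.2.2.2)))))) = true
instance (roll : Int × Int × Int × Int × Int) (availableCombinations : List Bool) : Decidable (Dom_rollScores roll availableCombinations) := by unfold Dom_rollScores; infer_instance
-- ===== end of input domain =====

-- B replaces A's hand-written pairwise dice comparisons by a face-count table read through one score(i) lookup over a single enumerate pass (idiomatic; equivalence of RETURN values — both are generators/lists of yielded pairs).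

-- ===== PORT A =====
-- first loop: 'for i,avail in enumerate(availableCombinations[:6])' (i is the enumerate index)
def pvGoA1 (r0 r1 r2 r3 r4 : Int) : Nat → List Bool → List (Int × Int)
  | _, [] => []
  | i, avail :: rest =>
    (if avail then
      let d : Int := (i : Int) + 1
      let n : Int := (((if r0 = d then 1 else 0) + (if r1 = d then 1 else 0) + (if r2 = d then 1 else 0) +
                       (if r3 = d then 1 else 0) + (if r4 = d then 1 else 0)) : Int) * d
      [((i : Int), n)]
    else []) ++ pvGoA1 r0 r1 r2 r3 r4 (i + 1) rest

-- second loop: 'for i,avail in enumerate(availableCombinations[6:])'; j tracks the already-shifted index i+6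
def pvGoA2 (r0 r1 r2 r3 r4 : Int) : Nat → List Bool → List (Int × Int)
  | _, [] => []
  | j, avail :: rest =>
    (if avail then
      let i : Int := (j : Int)
      if i = 6 then
        (if (r0, r1, r2, r3, r4) = ((1 : Int), (2 : Int), (3 : Int), (4 : Int), (5 : Int)) ∨
            (r0, r1, r2, r3, r4) = ((2 : Int), (3 : Int), (4 : Int), (5 : Int), (6 : Int)) then [(i, 20)] else [(i, 0)])
      else if i = 7 then
        (if r0 = r1 ∧ r3 = r4 ∧ (r2 = r1 ∨ r2 = r3) then [(i, 30)] else [(i, 0)])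
      else if i = 8 then
        (if r1 = r2 ∧ r2 = r3 ∧ (r0 = r1 ∨ r4 = r3) then [(i, 40)] else [(i, 0)])
      else if i = 9 then
        (if r0 = r4 then [(i, 50)] else [(i, 0)])
      else [(i, 0)]
    else []) ++ pvGoA2 r0 r1 r2 r3 r4 (j + 1) rest

def rollScores (roll : Int × Int × Int × Int × Int) (availableCombinations : List Bool) : List (Int × Int) :=
  let (r0, r1, r2, r3, r4) := roll
  pvGoA1 r0 r1 r2 r3 r4 0 (availableCombinations.take 6) ++
  pvGoA2 r0 r1 r2 r3 r4 6 (availableCombinations.drop 6)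

-- ===== PORT B =====
-- counts = {} ; for d in roll: counts[d] = counts.get(d, 0) + 1
def pvCounts (r0 r1 r2 r3 r4 : Int) : PySem.Dict Int Int :=
  [r0, r1, r2, r3, r4].foldl (fun d x => d.insert x (d.getD x 0 + 1)) PySem.Dict.empty

-- mult = sorted(counts.values())
def pvMult (r0 r1 r2 r3 r4 : Int) : List Int :=
  PySem.List.sorted (pvCounts r0 r1 r2 r3 r4).values (fun x => x) false

-- score(i); mult has 1..5 elements (5 dice), so Python's mult[-1] never raises
def pvScoreB (r0 r1 r2 r3 r4 : Int) (i : Int) : Int :=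
  let counts := pvCounts r0 r1 r2 r3 r4
  let mult := pvMult r0 r1 r2 r3 r4
  if i < 6 then counts.getD (i + 1) 0 * (i + 1)
  else if i = 6 then
    (if mult = [1, 1, 1, 1, 1] ∧ r4 - r0 = 4 ∧ (r0 = 1 ∨ r0 = 2) then 20 else 0)
  else if i = 7 then
    (if mult = [2, 3] ∨ mult = [5] then 30 else 0)
  else if i = 8 then
    (if 4 ≤ (PySem.List.pyGet? mult (-1)).getD 0 then 40 else 0)
  else if i = 9 then
    (if (PySem.List.pyGet? mult (-1)).getD 0 = 5 then 50 else 0)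
  else 0

-- [(i, score(i)) for i, avail in enumerate(availableCombinations) if avail]
def rollScores_alt (roll : Int × Int × Int × Int × Int) (availableCombinations : List Bool) : List (Int × Int) :=
  let (r0, r1, r2, r3, r4) := roll
  (PySem.List.enumerate availableCombinations).filterMap
    (fun p => if p.2 then some (p.1, pvScoreB r0 r1 r2 r3 r4 p.1) else none)

-- ===== PRECONDITION & SPEC =====
-- Pre_ excludes exactly the rolls that are not sorted ascending, on which A's assert raises AssertionError.
def Pre_rollScores (roll : Int × Int × Int × Int × Int) (availableCombinations : List Bool) : Prop :=
  roll.1 ≤ roll.2.1 ∧ roll.2.1 ≤ roll.2.2.1 ∧ roll.2.2.1 ≤ roll.2.2.2.1 ∧ roll.2.2.2.1 ≤ roll.2.2.2.2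
instance (roll : Int × Int × Int × Int × Int) (availableCombinations : List Bool) : Decidable (Pre_rollScores roll availableCombinations) := by unfold Pre_rollScores; infer_instance

def pvWitness_rollScores : (Int × Int × Int × Int × Int) × List Bool :=
  ((1, 2, 3, 4, 5), [true, false, true, true, true, true, true, true, true, true])

def Spec_rollScores (roll : Int × Int × Int × Int × Int) (availableCombinations : List Bool) (out : List (Int × Int)) : Prop := out = rollScores_alt roll availableCombinations
instance (roll : Int × Int × Int × Int × Int) (availableCombinations : List Bool) (out : List (Int × Int)) : Decidable (Spec_rollScores roll availableCombinations out) := by unfold Spec_rollScores; infer_instance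

-- ===== CLAIM (what is proved, stated in full; the proofs are below) =====
def Claim_equal_rollScores : Prop := ∀ (roll : Int × Int × Int × Int × Int) (availableCombinations : List Bool), Dom_rollScores roll availableCombinations → Pre_rollScores roll availableCombinations → Spec_rollScores roll availableCombinations (rollScores roll availableCombinations)

-- ===== LEMMAS AND PROOFS =====

-- counts.get(d, 0) is the number of dice equal to d
theorem pvCounts_getD (r0 r1 r2 r3 r4 d : Int) :
    (pvCounts r0 r1 r2 r3 r4).getD d 0 =
      (((if r0 = d then 1 else 0) + (if r1 = d then 1 else 0) + (if r2 = d then 1 else 0) +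
        (if r3 = d then 1 else 0) + (if r4 = d then 1 else 0)) : Int) := by
  unfold pvCounts
  rw [PySem.Dict.foldl_insert_getD_add_one_eq_counter, PySem.Dict.getD_counter]
  simp [List.count_cons]
  split_ifs <;> omega

-- the four lower-section predicates, rephrased over the sorted count multiset, agree with A's pairwise tests
theorem pvLower (r0 r1 r2 r3 r4 : Int) (h01 : r0 ≤ r1) (h12 : r1 ≤ r2) (h23 : r2 ≤ r3) (h34 : r3 ≤ r4) :
    ((if pvMult r0 r1 r2 r3 r4 = [1, 1, 1, 1, 1] ∧ r4 - r0 = 4 ∧ (r0 = 1 ∨ r0 = 2) then (20 : Int) else 0) =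
      (if (r0, r1, r2, r3, r4) = ((1 : Int), (2 : Int), (3 : Int), (4 : Int), (5 : Int)) ∨
          (r0, r1, r2, r3, r4) = ((2 : Int), (3 : Int), (4 : Int), (5 : Int), (6 : Int)) then 20 else 0)) ∧
    ((if pvMult r0 r1 r2 r3 r4 = [2, 3] ∨ pvMult r0 r1 r2 r3 r4 = [5] then (30 : Int) else 0) =
      (if r0 = r1 ∧ r3 = r4 ∧ (r2 = r1 ∨ r2 = r3) then 30 else 0)) ∧
    ((if 4 ≤ (PySem.List.pyGet? (pvMult r0 r1 r2 r3 r4) (-1)).getD 0 then (40 : Int) else 0) =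
      (if r1 = r2 ∧ r2 = r3 ∧ (r0 = r1 ∨ r4 = r3) then 40 else 0)) ∧
    ((if (PySem.List.pyGet? (pvMult r0 r1 r2 r3 r4) (-1)).getD 0 = 5 then (50 : Int) else 0) =
      (if r0 = r4 then 50 else 0)) := by
  rcases h01.eq_or_lt with e01 | l01 <;> (try subst e01) <;>
  rcases h12.eq_or_lt with e12 | l12 <;> (try subst e12) <;>
  rcases h23.eq_or_lt with e23 | l23 <;> (try subst e23) <;>
  rcases h34.eq_or_lt with e34 | l34 <;> (try subst e34)
  · -- pattern eeee : roll [r0, r0, r0, r0, r0], mult [5]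
    have hm : pvMult r0 r0 r0 r0 r0 = [(5 : Int)] := by
      have hS : PySem.Set.ofList [r0, r0, r0, r0, r0] = [r0] := by
        simp [PySem.Set.ofList_eq_foldl, PySem.Set.add_eq_ite]
      show PySem.List.sorted (PySem.Dict.counter [r0, r0, r0, r0, r0]).values (fun x => x) false = [(5 : Int)]
      simp only [PySem.Dict.values, PySem.Dict.items_counter, hS, List.map_map]
      norm_num [List.count_cons]
      decide
    simp only [hm, show (PySem.List.pyGet? [(5 : Int)] (-1)).getD 0 = (5 : Int) by decide]
    norm_num [Prod.mk.injEq]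
    try split_ifs
    repeat' apply And.intro
    all_goals omega
  · -- pattern eeel : roll [r0, r0, r0, r0, r4], mult [1, 4]
    have hm : pvMult r0 r0 r0 r0 r4 = [(1 : Int), (4 : Int)] := by
      have hS : PySem.Set.ofList [r0, r0, r0, r0, r4] = [r0, r4] := by
        simp [PySem.Set.ofList_eq_foldl, PySem.Set.add_eq_ite, (show r0 ≠ r4 by omega), (show r4 ≠ r0 by omega)]
      show PySem.List.sorted (PySem.Dict.counter [r0, r0, r0, r0, r4]).values (fun x => x) false = [(1 : Int), (4 : Int)]
      simp only [PySem.Dict.values, PySem.Dict.items_counter, hS, List.map_map]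
      norm_num [List.count_cons, (show r0 ≠ r4 by omega), (show r4 ≠ r0 by omega)]
      decide
    simp only [hm, show (PySem.List.pyGet? [(1 : Int), (4 : Int)] (-1)).getD 0 = (4 : Int) by decide]
    norm_num [Prod.mk.injEq]
    try split_ifs
    repeat' apply And.intro
    all_goals omega
  · -- pattern eele : roll [r0, r0, r0, r3, r3], mult [2, 3]
    have hm : pvMult r0 r0 r0 r3 r3 = [(2 : Int), (3 : Int)] := by
      have hS : PySem.Set.ofList [r0, r0, r0, r3, r3] = [r0, r3] := by
        simp [PySem.Set.ofList_eq_foldl, PySem.Set.add_eq_ite, (show r0 ≠ r3 by omega), (show r3 ≠ r0 by omega)]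
      show PySem.List.sorted (PySem.Dict.counter [r0, r0, r0, r3, r3]).values (fun x => x) false = [(2 : Int), (3 : Int)]
      simp only [PySem.Dict.values, PySem.Dict.items_counter, hS, List.map_map]
      norm_num [List.count_cons, (show r0 ≠ r3 by omega), (show r3 ≠ r0 by omega)]
      decide
    simp only [hm, show (PySem.List.pyGet? [(2 : Int), (3 : Int)] (-1)).getD 0 = (3 : Int) by decide]
    norm_num [Prod.mk.injEq]
    try split_ifs
    repeat' apply And.intro
    all_goals omega
  · -- pattern eell : roll [r0, r0, r0, r3, r4], mult [1, 1, 3]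
    have hm : pvMult r0 r0 r0 r3 r4 = [(1 : Int), (1 : Int), (3 : Int)] := by
      have hS : PySem.Set.ofList [r0, r0, r0, r3, r4] = [r0, r3, r4] := by
        simp [PySem.Set.ofList_eq_foldl, PySem.Set.add_eq_ite, (show r0 ≠ r3 by omega), (show r0 ≠ r4 by omega), (show r3 ≠ r0 by omega), (show r3 ≠ r4 by omega), (show r4 ≠ r0 by omega), (show r4 ≠ r3 by omega)]
      show PySem.List.sorted (PySem.Dict.counter [r0, r0, r0, r3, r4]).values (fun x => x) false = [(1 : Int), (1 : Int), (3 : Int)]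
      simp only [PySem.Dict.values, PySem.Dict.items_counter, hS, List.map_map]
      norm_num [List.count_cons, (show r0 ≠ r3 by omega), (show r0 ≠ r4 by omega), (show r3 ≠ r0 by omega), (show r3 ≠ r4 by omega), (show r4 ≠ r0 by omega), (show r4 ≠ r3 by omega)]
      decide
    simp only [hm, show (PySem.List.pyGet? [(1 : Int), (1 : Int), (3 : Int)] (-1)).getD 0 = (3 : Int) by decide]
    norm_num [Prod.mk.injEq]
    try split_ifs
    repeat' apply And.intro
    all_goals omega
  · -- pattern elee : roll [r0, r0, r2, r2, r2], mult [2, 3]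
    have hm : pvMult r0 r0 r2 r2 r2 = [(2 : Int), (3 : Int)] := by
      have hS : PySem.Set.ofList [r0, r0, r2, r2, r2] = [r0, r2] := by
        simp [PySem.Set.ofList_eq_foldl, PySem.Set.add_eq_ite, (show r0 ≠ r2 by omega), (show r2 ≠ r0 by omega)]
      show PySem.List.sorted (PySem.Dict.counter [r0, r0, r2, r2, r2]).values (fun x => x) false = [(2 : Int), (3 : Int)]
      simp only [PySem.Dict.values, PySem.Dict.items_counter, hS, List.map_map]
      norm_num [List.count_cons, (show r0 ≠ r2 by omega), (show r2 ≠ r0 by omega)]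
      decide
    simp only [hm, show (PySem.List.pyGet? [(2 : Int), (3 : Int)] (-1)).getD 0 = (3 : Int) by decide]
    norm_num [Prod.mk.injEq]
    try split_ifs
    repeat' apply And.intro
    all_goals omega
  · -- pattern elel : roll [r0, r0, r2, r2, r4], mult [1, 2, 2]
    have hm : pvMult r0 r0 r2 r2 r4 = [(1 : Int), (2 : Int), (2 : Int)] := by
      have hS : PySem.Set.ofList [r0, r0, r2, r2, r4] = [r0, r2, r4] := by
        simp [PySem.Set.ofList_eq_foldl, PySem.Set.add_eq_ite, (show r0 ≠ r2 by omega), (show r0 ≠ r4 by omega), (show r2 ≠ r0 by omega), (show r2 ≠ r4 by omega), (show r4 ≠ r0 by omega), (show r4 ≠ r2 by omega)]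
      show PySem.List.sorted (PySem.Dict.counter [r0, r0, r2, r2, r4]).values (fun x => x) false = [(1 : Int), (2 : Int), (2 : Int)]
      simp only [PySem.Dict.values, PySem.Dict.items_counter, hS, List.map_map]
      norm_num [List.count_cons, (show r0 ≠ r2 by omega), (show r0 ≠ r4 by omega), (show r2 ≠ r0 by omega), (show r2 ≠ r4 by omega), (show r4 ≠ r0 by omega), (show r4 ≠ r2 by omega)]
      decide
    simp only [hm, show (PySem.List.pyGet? [(1 : Int), (2 : Int), (2 : Int)] (-1)).getD 0 = (2 : Int) by decide]
    norm_num [Prod.mk.injEq]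
    try split_ifs
    repeat' apply And.intro
    all_goals omega
  · -- pattern elle : roll [r0, r0, r2, r3, r3], mult [1, 2, 2]
    have hm : pvMult r0 r0 r2 r3 r3 = [(1 : Int), (2 : Int), (2 : Int)] := by
      have hS : PySem.Set.ofList [r0, r0, r2, r3, r3] = [r0, r2, r3] := by
        simp [PySem.Set.ofList_eq_foldl, PySem.Set.add_eq_ite, (show r0 ≠ r2 by omega), (show r0 ≠ r3 by omega), (show r2 ≠ r0 by omega), (show r2 ≠ r3 by omega), (show r3 ≠ r0 by omega), (show r3 ≠ r2 by omega)]
      show PySem.List.sorted (PySem.Dict.counter [r0, r0, r2, r3, r3]).values (fun x => x) false = [(1 : Int), (2 : Int), (2 : Int)]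
      simp only [PySem.Dict.values, PySem.Dict.items_counter, hS, List.map_map]
      norm_num [List.count_cons, (show r0 ≠ r2 by omega), (show r0 ≠ r3 by omega), (show r2 ≠ r0 by omega), (show r2 ≠ r3 by omega), (show r3 ≠ r0 by omega), (show r3 ≠ r2 by omega)]
      decide
    simp only [hm, show (PySem.List.pyGet? [(1 : Int), (2 : Int), (2 : Int)] (-1)).getD 0 = (2 : Int) by decide]
    norm_num [Prod.mk.injEq]
    try split_ifs
    repeat' apply And.intro
    all_goals omega
  · -- pattern elll : roll [r0, r0, r2, r3, r4], mult [1, 1, 1, 2]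
    have hm : pvMult r0 r0 r2 r3 r4 = [(1 : Int), (1 : Int), (1 : Int), (2 : Int)] := by
      have hS : PySem.Set.ofList [r0, r0, r2, r3, r4] = [r0, r2, r3, r4] := by
        simp [PySem.Set.ofList_eq_foldl, PySem.Set.add_eq_ite, (show r0 ≠ r2 by omega), (show r0 ≠ r3 by omega), (show r0 ≠ r4 by omega), (show r2 ≠ r0 by omega), (show r2 ≠ r3 by omega), (show r2 ≠ r4 by omega), (show r3 ≠ r0 by omega), (show r3 ≠ r2 by omega), (show r3 ≠ r4 by omega), (show r4 ≠ r0 by omega), (show r4 ≠ r2 by omega), (show r4 ≠ r3 by omega)]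
      show PySem.List.sorted (PySem.Dict.counter [r0, r0, r2, r3, r4]).values (fun x => x) false = [(1 : Int), (1 : Int), (1 : Int), (2 : Int)]
      simp only [PySem.Dict.values, PySem.Dict.items_counter, hS, List.map_map]
      norm_num [List.count_cons, (show r0 ≠ r2 by omega), (show r0 ≠ r3 by omega), (show r0 ≠ r4 by omega), (show r2 ≠ r0 by omega), (show r2 ≠ r3 by omega), (show r2 ≠ r4 by omega), (show r3 ≠ r0 by omega), (show r3 ≠ r2 by omega), (show r3 ≠ r4 by omega), (show r4 ≠ r0 by omega), (show r4 ≠ r2 by omega), (show r4 ≠ r3 by omega)]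
      decide
    simp only [hm, show (PySem.List.pyGet? [(1 : Int), (1 : Int), (1 : Int), (2 : Int)] (-1)).getD 0 = (2 : Int) by decide]
    norm_num [Prod.mk.injEq]
    try split_ifs
    repeat' apply And.intro
    all_goals omega
  · -- pattern leee : roll [r0, r1, r1, r1, r1], mult [1, 4]
    have hm : pvMult r0 r1 r1 r1 r1 = [(1 : Int), (4 : Int)] := by
      have hS : PySem.Set.ofList [r0, r1, r1, r1, r1] = [r0, r1] := by
        simp [PySem.Set.ofList_eq_foldl, PySem.Set.add_eq_ite, (show r0 ≠ r1 by omega), (show r1 ≠ r0 by omega)]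
      show PySem.List.sorted (PySem.Dict.counter [r0, r1, r1, r1, r1]).values (fun x => x) false = [(1 : Int), (4 : Int)]
      simp only [PySem.Dict.values, PySem.Dict.items_counter, hS, List.map_map]
      norm_num [List.count_cons, (show r0 ≠ r1 by omega), (show r1 ≠ r0 by omega)]
      decide
    simp only [hm, show (PySem.List.pyGet? [(1 : Int), (4 : Int)] (-1)).getD 0 = (4 : Int) by decide]
    norm_num [Prod.mk.injEq]
    try split_ifs
    repeat' apply And.intro
    all_goals omega
  · -- pattern leel : roll [r0, r1, r1, r1, r4], mult [1, 1, 3]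
    have hm : pvMult r0 r1 r1 r1 r4 = [(1 : Int), (1 : Int), (3 : Int)] := by
      have hS : PySem.Set.ofList [r0, r1, r1, r1, r4] = [r0, r1, r4] := by
        simp [PySem.Set.ofList_eq_foldl, PySem.Set.add_eq_ite, (show r0 ≠ r1 by omega), (show r0 ≠ r4 by omega), (show r1 ≠ r0 by omega), (show r1 ≠ r4 by omega), (show r4 ≠ r0 by omega), (show r4 ≠ r1 by omega)]
      show PySem.List.sorted (PySem.Dict.counter [r0, r1, r1, r1, r4]).values (fun x => x) false = [(1 : Int), (1 : Int), (3 : Int)]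
      simp only [PySem.Dict.values, PySem.Dict.items_counter, hS, List.map_map]
      norm_num [List.count_cons, (show r0 ≠ r1 by omega), (show r0 ≠ r4 by omega), (show r1 ≠ r0 by omega), (show r1 ≠ r4 by omega), (show r4 ≠ r0 by omega), (show r4 ≠ r1 by omega)]
      decide
    simp only [hm, show (PySem.List.pyGet? [(1 : Int), (1 : Int), (3 : Int)] (-1)).getD 0 = (3 : Int) by decide]
    norm_num [Prod.mk.injEq]
    try split_ifs
    repeat' apply And.intro
    all_goals omega
  · -- pattern lele : roll [r0, r1, r1, r3, r3], mult [1, 2, 2]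
    have hm : pvMult r0 r1 r1 r3 r3 = [(1 : Int), (2 : Int), (2 : Int)] := by
      have hS : PySem.Set.ofList [r0, r1, r1, r3, r3] = [r0, r1, r3] := by
        simp [PySem.Set.ofList_eq_foldl, PySem.Set.add_eq_ite, (show r0 ≠ r1 by omega), (show r0 ≠ r3 by omega), (show r1 ≠ r0 by omega), (show r1 ≠ r3 by omega), (show r3 ≠ r0 by omega), (show r3 ≠ r1 by omega)]
      show PySem.List.sorted (PySem.Dict.counter [r0, r1, r1, r3, r3]).values (fun x => x) false = [(1 : Int), (2 : Int), (2 : Int)]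
      simp only [PySem.Dict.values, PySem.Dict.items_counter, hS, List.map_map]
      norm_num [List.count_cons, (show r0 ≠ r1 by omega), (show r0 ≠ r3 by omega), (show r1 ≠ r0 by omega), (show r1 ≠ r3 by omega), (show r3 ≠ r0 by omega), (show r3 ≠ r1 by omega)]
      decide
    simp only [hm, show (PySem.List.pyGet? [(1 : Int), (2 : Int), (2 : Int)] (-1)).getD 0 = (2 : Int) by decide]
    norm_num [Prod.mk.injEq]
    try split_ifs
    repeat' apply And.intro
    all_goals omega
  · -- pattern lell : roll [r0, r1, r1, r3, r4], mult [1, 1, 1, 2]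
    have hm : pvMult r0 r1 r1 r3 r4 = [(1 : Int), (1 : Int), (1 : Int), (2 : Int)] := by
      have hS : PySem.Set.ofList [r0, r1, r1, r3, r4] = [r0, r1, r3, r4] := by
        simp [PySem.Set.ofList_eq_foldl, PySem.Set.add_eq_ite, (show r0 ≠ r1 by omega), (show r0 ≠ r3 by omega), (show r0 ≠ r4 by omega), (show r1 ≠ r0 by omega), (show r1 ≠ r3 by omega), (show r1 ≠ r4 by omega), (show r3 ≠ r0 by omega), (show r3 ≠ r1 by omega), (show r3 ≠ r4 by omega), (show r4 ≠ r0 by omega), (show r4 ≠ r1 by omega), (show r4 ≠ r3 by omega)]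
      show PySem.List.sorted (PySem.Dict.counter [r0, r1, r1, r3, r4]).values (fun x => x) false = [(1 : Int), (1 : Int), (1 : Int), (2 : Int)]
      simp only [PySem.Dict.values, PySem.Dict.items_counter, hS, List.map_map]
      norm_num [List.count_cons, (show r0 ≠ r1 by omega), (show r0 ≠ r3 by omega), (show r0 ≠ r4 by omega), (show r1 ≠ r0 by omega), (show r1 ≠ r3 by omega), (show r1 ≠ r4 by omega), (show r3 ≠ r0 by omega), (show r3 ≠ r1 by omega), (show r3 ≠ r4 by omega), (show r4 ≠ r0 by omega), (show r4 ≠ r1 by omega), (show r4 ≠ r3 by omega)]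
      decide
    simp only [hm, show (PySem.List.pyGet? [(1 : Int), (1 : Int), (1 : Int), (2 : Int)] (-1)).getD 0 = (2 : Int) by decide]
    norm_num [Prod.mk.injEq]
    try split_ifs
    repeat' apply And.intro
    all_goals omega
  · -- pattern llee : roll [r0, r1, r2, r2, r2], mult [1, 1, 3]
    have hm : pvMult r0 r1 r2 r2 r2 = [(1 : Int), (1 : Int), (3 : Int)] := by
      have hS : PySem.Set.ofList [r0, r1, r2, r2, r2] = [r0, r1, r2] := by
        simp [PySem.Set.ofList_eq_foldl, PySem.Set.add_eq_ite, (show r0 ≠ r1 by omega), (show r0 ≠ r2 by omega), (show r1 ≠ r0 by omega), (show r1 ≠ r2 by omega), (show r2 ≠ r0 by omega), (show r2 ≠ r1 by omega)]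
      show PySem.List.sorted (PySem.Dict.counter [r0, r1, r2, r2, r2]).values (fun x => x) false = [(1 : Int), (1 : Int), (3 : Int)]
      simp only [PySem.Dict.values, PySem.Dict.items_counter, hS, List.map_map]
      norm_num [List.count_cons, (show r0 ≠ r1 by omega), (show r0 ≠ r2 by omega), (show r1 ≠ r0 by omega), (show r1 ≠ r2 by omega), (show r2 ≠ r0 by omega), (show r2 ≠ r1 by omega)]
      decide
    simp only [hm, show (PySem.List.pyGet? [(1 : Int), (1 : Int), (3 : Int)] (-1)).getD 0 = (3 : Int) by decide]
    norm_num [Prod.mk.injEq]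
    try split_ifs
    repeat' apply And.intro
    all_goals omega
  · -- pattern llel : roll [r0, r1, r2, r2, r4], mult [1, 1, 1, 2]
    have hm : pvMult r0 r1 r2 r2 r4 = [(1 : Int), (1 : Int), (1 : Int), (2 : Int)] := by
      have hS : PySem.Set.ofList [r0, r1, r2, r2, r4] = [r0, r1, r2, r4] := by
        simp [PySem.Set.ofList_eq_foldl, PySem.Set.add_eq_ite, (show r0 ≠ r1 by omega), (show r0 ≠ r2 by omega), (show r0 ≠ r4 by omega), (show r1 ≠ r0 by omega), (show r1 ≠ r2 by omega), (show r1 ≠ r4 by omega), (show r2 ≠ r0 by omega), (show r2 ≠ r1 by omega), (show r2 ≠ r4 by omega), (show r4 ≠ r0 by omega), (show r4 ≠ r1 by omega), (show r4 ≠ r2 by omega)]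
      show PySem.List.sorted (PySem.Dict.counter [r0, r1, r2, r2, r4]).values (fun x => x) false = [(1 : Int), (1 : Int), (1 : Int), (2 : Int)]
      simp only [PySem.Dict.values, PySem.Dict.items_counter, hS, List.map_map]
      norm_num [List.count_cons, (show r0 ≠ r1 by omega), (show r0 ≠ r2 by omega), (show r0 ≠ r4 by omega), (show r1 ≠ r0 by omega), (show r1 ≠ r2 by omega), (show r1 ≠ r4 by omega), (show r2 ≠ r0 by omega), (show r2 ≠ r1 by omega), (show r2 ≠ r4 by omega), (show r4 ≠ r0 by omega), (show r4 ≠ r1 by omega), (show r4 ≠ r2 by omega)]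
      decide
    simp only [hm, show (PySem.List.pyGet? [(1 : Int), (1 : Int), (1 : Int), (2 : Int)] (-1)).getD 0 = (2 : Int) by decide]
    norm_num [Prod.mk.injEq]
    try split_ifs
    repeat' apply And.intro
    all_goals omega
  · -- pattern llle : roll [r0, r1, r2, r3, r3], mult [1, 1, 1, 2]
    have hm : pvMult r0 r1 r2 r3 r3 = [(1 : Int), (1 : Int), (1 : Int), (2 : Int)] := by
      have hS : PySem.Set.ofList [r0, r1, r2, r3, r3] = [r0, r1, r2, r3] := by
        simp [PySem.Set.ofList_eq_foldl, PySem.Set.add_eq_ite, (show r0 ≠ r1 by omega), (show r0 ≠ r2 by omega), (show r0 ≠ r3 by omega), (show r1 ≠ r0 by omega), (show r1 ≠ r2 by omega), (show r1 ≠ r3 by omega), (show r2 ≠ r0 by omega), (show r2 ≠ r1 by omega), (show r2 ≠ r3 by omega), (show r3 ≠ r0 by omega), (show r3 ≠ r1 by omega), (show r3 ≠ r2 by omega)]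
      show PySem.List.sorted (PySem.Dict.counter [r0, r1, r2, r3, r3]).values (fun x => x) false = [(1 : Int), (1 : Int), (1 : Int), (2 : Int)]
      simp only [PySem.Dict.values, PySem.Dict.items_counter, hS, List.map_map]
      norm_num [List.count_cons, (show r0 ≠ r1 by omega), (show r0 ≠ r2 by omega), (show r0 ≠ r3 by omega), (show r1 ≠ r0 by omega), (show r1 ≠ r2 by omega), (show r1 ≠ r3 by omega), (show r2 ≠ r0 by omega), (show r2 ≠ r1 by omega), (show r2 ≠ r3 by omega), (show r3 ≠ r0 by omega), (show r3 ≠ r1 by omega), (show r3 ≠ r2 by omega)]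
      decide
    simp only [hm, show (PySem.List.pyGet? [(1 : Int), (1 : Int), (1 : Int), (2 : Int)] (-1)).getD 0 = (2 : Int) by decide]
    norm_num [Prod.mk.injEq]
    try split_ifs
    repeat' apply And.intro
    all_goals omega
  · -- pattern llll : roll [r0, r1, r2, r3, r4], mult [1, 1, 1, 1, 1]
    have hm : pvMult r0 r1 r2 r3 r4 = [(1 : Int), (1 : Int), (1 : Int), (1 : Int), (1 : Int)] := by
      have hS : PySem.Set.ofList [r0, r1, r2, r3, r4] = [r0, r1, r2, r3, r4] := by
        simp [PySem.Set.ofList_eq_foldl, PySem.Set.add_eq_ite, (show r0 ≠ r1 by omega), (show r0 ≠ r2 by omega), (show r0 ≠ r3 by omega), (show r0 ≠ r4 by omega), (show r1 ≠ r0 by omega), (show r1 ≠ r2 by omega), (show r1 ≠ r3 by omega), (show r1 ≠ r4 by omega), (show r2 ≠ r0 by omega), (show r2 ≠ r1 by omega), (show r2 ≠ r3 by omega), (show r2 ≠ r4 by omega), (show r3 ≠ r0 by omega), (show r3 ≠ r1 by omega), (show r3 ≠ r2 by omega), (show r3 ≠ r4 by omega), (show r4 ≠ r0 by omega), (show r4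 ≠ r1 by omega), (show r4 ≠ r2 by omega), (show r4 ≠ r3 by omega)]
      show PySem.List.sorted (PySem.Dict.counter [r0, r1, r2, r3, r4]).values (fun x => x) false = [(1 : Int), (1 : Int), (1 : Int), (1 : Int), (1 : Int)]
      simp only [PySem.Dict.values, PySem.Dict.items_counter, hS, List.map_map]
      norm_num [List.count_cons, (show r0 ≠ r1 by omega), (show r0 ≠ r2 by omega), (show r0 ≠ r3 by omega), (show r0 ≠ r4 by omega), (show r1 ≠ r0 by omega), (show r1 ≠ r2 by omega), (show r1 ≠ r3 by omega), (show r1 ≠ r4 by omega), (show r2 ≠ r0 by omega), (show r2 ≠ r1 by omega), (show r2 ≠ r3 by omega), (show r2 ≠ r4 by omega), (show r3 ≠ r0 by omega), (show r3 ≠ r1 by omega), (show r3 ≠ r2 by omega), (show r3 ≠ r4 by omega), (show r4 ≠ r0 by omega), (show r4 ≠ r1 by omega), (show r4 ≠ r2 by omega), (show r4 ≠ r3 by omega)]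
      decide
    simp only [hm, show (PySem.List.pyGet? [(1 : Int), (1 : Int), (1 : Int), (1 : Int), (1 : Int)] (-1)).getD 0 = (1 : Int) by decide]
    norm_num [Prod.mk.injEq]
    try split_ifs
    repeat' apply And.intro
    all_goals omega

-- B's score(i) coincides with A's lower-section value at each index
theorem pvScore6 (r0 r1 r2 r3 r4 : Int) (h01 : r0 ≤ r1) (h12 : r1 ≤ r2) (h23 : r2 ≤ r3) (h34 : r3 ≤ r4) :
    pvScoreB r0 r1 r2 r3 r4 6 =
      (if (r0, r1, r2, r3, r4) = ((1 : Int), (2 : Int), (3 : Int), (4 : Int), (5 : Int)) ∨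
          (r0, r1, r2, r3, r4) = ((2 : Int), (3 : Int), (4 : Int), (5 : Int), (6 : Int)) then 20 else 0) := by
  have h := (pvLower r0 r1 r2 r3 r4 h01 h12 h23 h34).1
  norm_num [pvScoreB]
  simp only [Prod.mk.injEq] at h
  exact h

theorem pvScore7 (r0 r1 r2 r3 r4 : Int) (h01 : r0 ≤ r1) (h12 : r1 ≤ r2) (h23 : r2 ≤ r3) (h34 : r3 ≤ r4) :
    pvScoreB r0 r1 r2 r3 r4 7 = (if r0 = r1 ∧ r3 = r4 ∧ (r2 = r1 ∨ r2 = r3) then 30 else 0) := by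
  have h := (pvLower r0 r1 r2 r3 r4 h01 h12 h23 h34).2.1
  norm_num [pvScoreB]
  exact h

theorem pvScore8 (r0 r1 r2 r3 r4 : Int) (h01 : r0 ≤ r1) (h12 : r1 ≤ r2) (h23 : r2 ≤ r3) (h34 : r3 ≤ r4) :
    pvScoreB r0 r1 r2 r3 r4 8 = (if r1 = r2 ∧ r2 = r3 ∧ (r0 = r1 ∨ r4 = r3) then 40 else 0) := by
  have h := (pvLower r0 r1 r2 r3 r4 h01 h12 h23 h34).2.2.1
  norm_num [pvScoreB]
  exact h

theorem pvScore9 (r0 r1 r2 r3 r4 : Int) (h01 : r0 ≤ r1) (h12 : r1 ≤ r2) (h23 : r2 ≤ r3) (h34 : r3 ≤ r4) :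
    pvScoreB r0 r1 r2 r3 r4 9 = (if r0 = r4 then 50 else 0) := by
  have h := (pvLower r0 r1 r2 r3 r4 h01 h12 h23 h34).2.2.2
  norm_num [pvScoreB]
  exact h

-- B's single pass, started at index j ≥ 6, is A's second loop
theorem pvB_eq_goA2 (r0 r1 r2 r3 r4 : Int) (h01 : r0 ≤ r1) (h12 : r1 ≤ r2) (h23 : r2 ≤ r3) (h34 : r3 ≤ r4)
    (l : List Bool) (j : Nat) (hj : 6 ≤ j) :
    (PySem.List.enumerate l (j : Int)).filterMap
      (fun p => if p.2 then some (p.1, pvScoreB r0 r1 r2 r3 r4 p.1) else none) =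
    pvGoA2 r0 r1 r2 r3 r4 j l := by
  induction l generalizing j with
  | nil => simp [PySem.List.enumerate_nil, pvGoA2]
  | cons a rest ih =>
    rw [PySem.List.enumerate_cons]
    simp only [List.filterMap_cons, pvGoA2]
    have hnext : ((j : Int) + 1) = (((j + 1 : Nat)) : Int) := by push_cast; ring
    rw [hnext, ih (j + 1) (by omega)]
    cases a
    · simp
    · simp only [if_pos]
      rcases (show j = 6 ∨ j = 7 ∨ j = 8 ∨ j = 9 ∨ 10 ≤ j by omega) with h | h | h | h | h
      · subst h
        push_cast
        rw [pvScore6 r0 r1 r2 r3 r4 h01 h12 h23 h34]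
        norm_num
        split_ifs <;> simp
      · subst h
        push_cast
        rw [pvScore7 r0 r1 r2 r3 r4 h01 h12 h23 h34]
        split_ifs <;> simp
      · subst h
        push_cast
        rw [pvScore8 r0 r1 r2 r3 r4 h01 h12 h23 h34]
        split_ifs <;> simp
      · subst h
        push_cast
        rw [pvScore9 r0 r1 r2 r3 r4 h01 h12 h23 h34]
        split_ifs <;> simp
      · have h6 : ¬ ((j : Int) = 6) := by omega
        have h7 : ¬ ((j : Int) = 7) := by omega
        have h8 : ¬ ((j : Int) = 8) := by omega
        have h9 : ¬ ((j : Int) = 9) := by omega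
        have hs : pvScoreB r0 r1 r2 r3 r4 (j : Int) = 0 := by
          simp only [pvScoreB]
          rw [if_neg (by omega), if_neg h6, if_neg h7, if_neg h8, if_neg h9]
        simp [hs, h6, h7, h8, h9]

-- B's single pass splits into A's two loops
theorem pvB_split (r0 r1 r2 r3 r4 : Int) (h01 : r0 ≤ r1) (h12 : r1 ≤ r2) (h23 : r2 ≤ r3) (h34 : r3 ≤ r4)
    (l : List Bool) (i : Nat) (hi : i ≤ 6) :
    (PySem.List.enumerate l (i : Int)).filterMap
      (fun p => if p.2 then some (p.1, pvScoreB r0 r1 r2 r3 r4 p.1) else none) =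
    pvGoA1 r0 r1 r2 r3 r4 i (l.take (6 - i)) ++ pvGoA2 r0 r1 r2 r3 r4 6 (l.drop (6 - i)) := by
  induction l generalizing i with
  | nil => simp [PySem.List.enumerate_nil, pvGoA1, pvGoA2]
  | cons a rest ih =>
    rcases Nat.lt_or_ge i 6 with hlt | hge
    · have h6 : 6 - i = (6 - (i + 1)) + 1 := by omega
      rw [PySem.List.enumerate_cons, h6]
      simp only [List.filterMap_cons, List.take_succ_cons, List.drop_succ_cons, pvGoA1]
      have hnext : ((i : Int) + 1) = (((i + 1 : Nat)) : Int) := by push_cast; ring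
      rw [hnext, ih (i + 1) (by omega)]
      cases a
      · simp
      · simp only [if_pos, List.cons_append]
        have hs : pvScoreB r0 r1 r2 r3 r4 (i : Int) =
            (((if r0 = (i : Int) + 1 then 1 else 0) + (if r1 = (i : Int) + 1 then 1 else 0) +
              (if r2 = (i : Int) + 1 then 1 else 0) + (if r3 = (i : Int) + 1 then 1 else 0) +
              (if r4 = (i : Int) + 1 then 1 else 0)) : Int) * ((i : Int) + 1) := by
          simp only [pvScoreB]
          rw [if_pos (by omega), pvCounts_getD]
        simp [hs]
    · have h6 : i = 6 := by omega
      subst h6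
      simp only [Nat.sub_self, List.take_zero, List.drop_zero, pvGoA1]
      rw [List.nil_append]
      exact pvB_eq_goA2 r0 r1 r2 r3 r4 h01 h12 h23 h34 (a :: rest) 6 (by omega)

-- ===== VERDICT (by name: the statement is the Claim_ definition above) =====
theorem rollScores_spec : Claim_equal_rollScores := by
  intro roll ac _hdom hpre
  obtain ⟨r0, r1, r2, r3, r4⟩ := roll
  obtain ⟨h01, h12, h23, h34⟩ := hpre
  show rollScores _ _ = rollScores_alt _ _
  simp only [rollScores, rollScores_alt]
  rw [show (PySem.List.enumerate ac) = PySem.List.enumerate ac ((0 : Nat) : Int) by norm_num,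
      pvB_split r0 r1 r2 r3 r4 h01 h12 h23 h34 ac 0 (by omega)]
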